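-- pv_equiv track=rewrite | github.com/Nghia03092004/nghia03092004.github.io | project_euler/problem_882/solution.py | max_number_dp
-- ===== SOURCE A (Python) =====
-- COST = {0: 6, 1: 2, 2: 5, 3: 5, 4: 4, 5: 5, 6: 6, 7: 3, 8: 7, 9: 6}
--
-- def max_number_dp(m):
--     """Find maximum number displayable with exactly m matchsticks."""
--     if m <= 1:
--         return -1
--     # dp[s] = max number with exactly s matchsticks, or -1 if impossible
--     dp = [-1] * (m + 1)
--     dp[0] = 0
--     for s in range(1, m + 1):
--         for d in range(10):
--             c = COST[d]
--             if s >= c and dp[s - c] >= 0: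
--                 candidate = dp[s - c] * 10 + d
--                 if candidate > dp[s]:
--                     dp[s] = candidate
--     return dp[m]
-- ===== SOURCE B (Python) =====
-- def max_number_dp(m):
--     """Find maximum number displayable with exactly m matchsticks.
--
--     Closed form: the maximum uses as many digits as possible (each digit costs
--     at least 2 sticks, '1' costs exactly 2), so with m even the answer is
--     m//2 ones (a repunit), and with m odd a leading '7' (cost 3) followed by
--     m//2 - 1 ones.
--     """
--     if m <= 1:
--         return -1
--     k = m // 2
--     if m % 2 == 0:
--         return (10**k - 1) // 9
--     return 7 * 10**(k - 1) + (10**(k - 1) - 1) // 9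
-- ===== Notes on version B (the rewrite author's own statement) =====
-- stated objective: faster
-- what changed: Replaced the O(m^2)-digit-operation dynamic program over all stick counts by the closed-form answer: a repunit of m//2 ones for even m, and 7 followed by m//2-1 ones for odd m.
import Mathlib
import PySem

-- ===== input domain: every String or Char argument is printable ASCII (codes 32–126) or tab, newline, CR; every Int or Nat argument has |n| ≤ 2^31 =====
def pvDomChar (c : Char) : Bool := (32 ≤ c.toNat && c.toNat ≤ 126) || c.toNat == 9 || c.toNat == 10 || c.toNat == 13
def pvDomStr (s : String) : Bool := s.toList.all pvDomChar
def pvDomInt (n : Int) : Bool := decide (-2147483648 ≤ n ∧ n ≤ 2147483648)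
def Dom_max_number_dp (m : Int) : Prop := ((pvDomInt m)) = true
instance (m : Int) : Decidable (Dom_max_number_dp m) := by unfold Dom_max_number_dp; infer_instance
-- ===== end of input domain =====

-- B replaces A's dynamic program over all stick counts by the closed-form answer
-- (a repunit of m//2 ones, with a leading 7 when m is odd); equivalence proved for all m.

-- ===== PORT A =====
-- COST = {0: 6, 1: 2, ...}
def pvCOST : PySem.Dict Int Int :=
  PySem.Dict.ofList [(0, 6), (1, 2), (2, 5), (3, 5), (4, 4), (5, 5), (6, 6), (7, 3), (8, 7), (9, 6)]

-- body of the inner `for d in range(10)` loop; the nested ifs transliterate Python's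
-- short-circuit `s >= c and dp[s - c] >= 0`.  `COST[d]` always hits (d ∈ 0..9), so the
-- `.getD 0` default of the dict lookup is never used; dp[s-c] and dp[s] are read only
-- in range (0 ≤ s-c < s ≤ m < len dp), so the `.getD (-1)` defaults are never used.
def pvInnerStep (s : Int) (dp : List Int) (d : Int) : List Int :=
  let c := (PySem.Dict.get? pvCOST d).getD 0
  if s ≥ c then
    let p := (PySem.List.pyGet? dp (s - c)).getD (-1)
    if p ≥ 0 then
      let candidate := p * 10 + d
      if candidate > (PySem.List.pyGet? dp s).getD (-1) then
        PySem.List.pySetD dp s candidate    -- dp[s] = candidate (s ∈ 1..m: in range)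
      else dp
    else dp
  else dp

def pvInner (dp : List Int) (s : Int) : List Int :=
  (PySem.List.pyRange 0 10 1).foldl (pvInnerStep s) dp

def max_number_dp (m : Int) : Int :=
  if m ≤ 1 then -1
  else
    -- dp = [-1] * (m + 1); dp[0] = 0
    let dp0 := PySem.List.pySetD (List.replicate (m + 1).toNat (-1 : Int)) 0 0
    let dp1 := (PySem.List.pyRange 1 (m + 1) 1).foldl pvInner dp0
    (PySem.List.pyGet? dp1 m).getD (-1)    -- dp[m] (in range; default never used)

-- ===== PORT B =====
-- transliteration of Source B; the exponents m//2 (≥ 1) and m//2 - 1 (≥ 0) are nonnegative,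
-- so `.toNat` on them is exact for Python's `**`.
def max_number_dp_alt (m : Int) : Int :=
  if m ≤ 1 then -1
  else
    let k := PySem.Int.floordiv m 2
    if PySem.Int.mod m 2 = 0 then
      PySem.Int.floordiv (10 ^ k.toNat - 1) 9
    else
      7 * 10 ^ (k.toNat - 1) + PySem.Int.floordiv (10 ^ (k.toNat - 1) - 1) 9

-- ===== PRECONDITION & SPEC =====
def Spec_max_number_dp (m : Int) (out : Int) : Prop := out = max_number_dp_alt m
instance (m : Int) (out : Int) : Decidable (Spec_max_number_dp m out) := by unfold Spec_max_number_dp; infer_instance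

-- ===== CLAIM (what is proved, stated in full; the proofs are below) =====
def Claim_equal_max_number_dp : Prop := ∀ (m : Int), Dom_max_number_dp m → Spec_max_number_dp m (max_number_dp m)

-- ===== LEMMAS AND PROOFS =====

-- the repunit 11…1 with k ones
def rep : Nat → Int
  | 0 => 0
  | k + 1 => 10 * rep k + 1

-- the value of A's dp[s] once the outer loop has processed s: -1 at s = 1, else the
-- largest number writable with exactly s sticks
def fval (s : Nat) : Int :=
  if s = 0 then 0
  else if s = 1 then -1
  else if s % 2 = 0 then rep (s / 2)
  else 7 * 10 ^ (s / 2 - 1) + rep (s / 2 - 1)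

lemma nine_rep (k : Nat) : 9 * rep k = 10 ^ k - 1 := by
  induction k with
  | zero => simp [rep]
  | succ k ih => rw [rep]; rw [pow_succ]; ring_nf; ring_nf at ih; omega

lemma one_le_pow10 (k : Nat) : (1 : Int) ≤ 10 ^ k := one_le_pow₀ (by norm_num)

lemma rep_nonneg (k : Nat) : 0 ≤ rep k := by
  have h := nine_rep k; have := one_le_pow10 k; omega

lemma rep_lt_pow (k : Nat) : rep k < 10 ^ k := by
  have h := nine_rep k; have := one_le_pow10 k; omega

lemma pow_succ10 (k : Nat) : (10 : Int) ^ (k + 1) = 10 * 10 ^ k := by ring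

lemma pow_le_rep (k : Nat) : 10 ^ k ≤ rep (k + 1) := by
  have h := nine_rep (k + 1)
  have hp := pow_succ10 k
  have := one_le_pow10 k; omega

lemma rep_lt_two_pow (k : Nat) : rep (k + 1) < 2 * 10 ^ k := by
  have h := nine_rep (k + 1)
  have hp := pow_succ10 k
  have := one_le_pow10 k; omega

lemma fval_of_even {s : Nat} (h2 : 2 ≤ s) (he : s % 2 = 0) : fval s = rep (s / 2) := by
  unfold fval; rw [if_neg (by omega), if_neg (by omega), if_pos he]

lemma fval_of_odd {s : Nat} (h2 : 2 ≤ s) (ho : s % 2 = 1) :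
    fval s = 7 * 10 ^ (s / 2 - 1) + rep (s / 2 - 1) := by
  unfold fval; rw [if_neg (by omega), if_neg (by omega), if_neg (by omega)]

lemma fval_lb {s : Nat} (h2 : 2 ≤ s) : 10 ^ (s / 2 - 1) ≤ fval s := by
  rcases Nat.mod_two_eq_zero_or_one s with he | ho
  · rw [fval_of_even h2 he]
    have h1 : s / 2 - 1 + 1 = s / 2 := by omega
    have := pow_le_rep (s / 2 - 1); rw [h1] at this; exact this
  · rw [fval_of_odd h2 ho]
    have := rep_nonneg (s / 2 - 1); have := one_le_pow10 (s / 2 - 1); omega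

lemma fval_pos {s : Nat} (h2 : 2 ≤ s) : 0 < fval s := by
  have := fval_lb h2; have := one_le_pow10 (s / 2 - 1); omega

lemma fval_ub (s : Nat) : fval s < 10 ^ (s / 2) := by
  rcases Nat.lt_or_ge s 2 with h | h2
  · interval_cases s <;> simp [fval]
  rcases Nat.mod_two_eq_zero_or_one s with he | ho
  · rw [fval_of_even h2 he]; exact rep_lt_pow _
  · rw [fval_of_odd h2 ho]
    obtain ⟨j, hj⟩ : ∃ j, s / 2 = j + 1 := ⟨s / 2 - 1, by omega⟩
    have hr := rep_lt_pow (s / 2 - 1)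
    have hp : (10:Int) ^ (s / 2) = 10 * 10 ^ (s / 2 - 1) := by
      rw [hj, Nat.add_sub_cancel, pow_succ10]
    have := one_le_pow10 (s / 2 - 1); omega

lemma fval_odd_lb {s : Nat} (h3 : 3 ≤ s) (ho : s % 2 = 1) : 7 * 10 ^ (s / 2 - 1) ≤ fval s := by
  rw [fval_of_odd (by omega) ho]; have := rep_nonneg (s / 2 - 1); omega

lemma fval_even_ub {s : Nat} (h2 : 2 ≤ s) (he : s % 2 = 0) : fval s < 2 * 10 ^ (s / 2 - 1) := by
  rw [fval_of_even h2 he]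
  have h1 : s / 2 - 1 + 1 = s / 2 := by omega
  have := rep_lt_two_pow (s / 2 - 1); rw [h1] at this; exact this

lemma fval_nonneg {s : Nat} (h : s ≠ 1) : 0 ≤ fval s := by
  rcases Nat.lt_or_ge s 2 with h' | h2
  · have h0 : s = 0 := by omega
    subst h0; simp [fval]
  · exact le_of_lt (fval_pos h2)

-- dp[s] = dp[s-2] * 10 + 1 for s ≥ 4
lemma fval_step {s : Nat} (h4 : 4 ≤ s) : fval s = fval (s - 2) * 10 + 1 := by
  obtain ⟨k, hk⟩ : ∃ k, s / 2 = k + 2 := ⟨s / 2 - 2, by omega⟩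
  rcases Nat.mod_two_eq_zero_or_one s with he | ho
  · rw [fval_of_even (by omega) he, fval_of_even (by omega) (by omega),
        show (s - 2) / 2 = k + 1 by omega, hk, rep, rep]
    ring
  · rw [fval_of_odd (by omega) ho, fval_of_odd (by omega) (by omega),
        show (s - 2) / 2 - 1 = k by omega, show s / 2 - 1 = k + 1 by omega, rep]
    ring

-- every candidate from a digit of cost ≥ 3 loses to the candidate dp[s-2]*10 + 1 (digit 1)
lemma cand_lt {s : Nat} (h4 : 4 ≤ s) (c d : Int) (hc3 : 3 ≤ c) (hc7 : c ≤ 7)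
    (hcs : c ≤ (s : Int)) (hd0 : 0 ≤ d) (hd9 : d ≤ 9)
    (hge : 0 ≤ fval (s - c.toNat)) :
    fval (s - c.toNat) * 10 + d < fval (s - 2) * 10 + 1 := by
  set cn : Nat := c.toNat with hcn
  set t : Nat := s - cn with ht
  have hRlb : 10 ^ ((s - 2) / 2 - 1) ≤ fval (s - 2) := fval_lb (by omega)
  have hplb := one_le_pow10 ((s - 2) / 2 - 1)
  rcases Nat.lt_or_ge t 2 with h01 | ht2
  · -- t = 0 (t = 1 has fval = -1, contradicting hge)
    have h01' : t = 0 ∨ t = 1 := by omega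
    rcases h01' with h0 | h1
    · rw [h0] at hge ⊢
      rw [show fval 0 = 0 from rfl]
      omega
    · rw [h1, show fval 1 = (-1 : Int) from rfl] at hge
      omega
  · -- t ≥ 2
    have hub := fval_ub t
    by_cases hco : s % 2 = 1 ∧ cn = 3
    · -- odd s, cost 3: same digit count, leading 7 beats leading 1
      obtain ⟨ho, hc3'⟩ := hco
      have hte : t % 2 = 0 := by omega
      have htj : t / 2 = (s - 2) / 2 := by omega
      have hLu : fval t < 2 * 10 ^ ((s - 2) / 2 - 1) := by
        have h := fval_even_ub ht2 hte
        rw [htj] at h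
        exact h
      have hRlb7 : 7 * 10 ^ ((s - 2) / 2 - 1) ≤ fval (s - 2) :=
        fval_odd_lb (by omega) (by omega)
      omega
    · -- strictly fewer digits: the whole candidate is below 10^((s-2)/2) ≤ dp[s-2]*10
      have hdig : t / 2 + 1 ≤ (s - 2) / 2 := by omega
      have hmono : (10:Int) ^ (t / 2 + 1) ≤ 10 ^ ((s - 2) / 2) :=
        pow_le_pow_right₀ (by norm_num) hdig
      have hps := pow_succ10 (t / 2)
      obtain ⟨j, hj⟩ : ∃ j, (s - 2) / 2 = j + 1 := ⟨(s - 2) / 2 - 1, by omega⟩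
      have hps2 : (10:Int) ^ ((s - 2) / 2) = 10 * 10 ^ ((s - 2) / 2 - 1) := by
        rw [hj, Nat.add_sub_cancel, pow_succ10]
      omega

-- the evolution of the running value dp[s] through one digit of the inner loop
def stepv (s : Nat) (c d v : Int) : Int :=
  if (s : Int) ≥ c then
    if fval (s - c.toNat) ≥ 0 then
      if fval (s - c.toNat) * 10 + d > v then fval (s - c.toNat) * 10 + d else v
    else v
  else v

-- dp[s] after the full inner loop, digits 0..9 (costs 6,2,5,5,4,5,6,3,7,6)
def vchain (s : Nat) : Int :=
  stepv s 6 9 (stepv s 7 8 (stepv s 3 7 (stepv s 6 6 (stepv s 5 5 (stepv s 4 4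
    (stepv s 5 3 (stepv s 5 2 (stepv s 2 1 (stepv s 6 0 (-1))))))))))

lemma stepv_lt {s : Nat} {c d v w : Int}
    (hcand : (s : Int) ≥ c → 0 ≤ fval (s - c.toNat) → fval (s - c.toNat) * 10 + d < w)
    (hv : v < w) : stepv s c d v < w := by
  unfold stepv
  split_ifs with h1 h2 h3
  · exact hcand h1 h2
  all_goals exact hv

lemma stepv_fix {s : Nat} {c d w : Int}
    (hcand : (s : Int) ≥ c → 0 ≤ fval (s - c.toNat) → fval (s - c.toNat) * 10 + d < w) :
    stepv s c d w = w := by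
  unfold stepv
  split_ifs with h1 h2 h3
  · exact absurd (hcand h1 h2) (by omega)
  all_goals rfl

-- digit 1 (cost 2) always improves the running value to dp[s-2]*10 + 1
lemma stepv_two {s : Nat} {v : Int} (hs : 2 ≤ s) (hne : 0 ≤ fval (s - 2))
    (hv : v < fval (s - 2) * 10 + 1) :
    stepv s 2 1 v = fval (s - 2) * 10 + 1 := by
  unfold stepv
  rw [if_pos (show (s : Int) ≥ 2 by omega), show ((2:Int).toNat) = 2 from rfl,
      if_pos hne, if_pos (by omega)]

lemma vchain_eq {s : Nat} (h1 : 1 ≤ s) : vchain s = fval s := by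
  rcases Nat.lt_or_ge s 4 with hs | h4
  · interval_cases s <;> decide
  · -- general case: digit 1 sets dp[s] to fval s; no other digit beats it
    have hfs : fval s = fval (s - 2) * 10 + 1 := fval_step h4
    have hlow : ∀ (c d : Int), 3 ≤ c → c ≤ 7 → 0 ≤ d → d ≤ 9 →
        ((s : Int) ≥ c → 0 ≤ fval (s - c.toNat) →
          fval (s - c.toNat) * 10 + d < fval (s - 2) * 10 + 1) := by
      intro c d hc3 hc7 hd0 hd9 hsc hge
      exact cand_lt h4 c d hc3 hc7 (by omega) hd0 hd9 hge
    have hne2 : 0 ≤ fval (s - 2) := fval_nonneg (by omega)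
    have h0 : stepv s 6 0 (-1) < fval (s - 2) * 10 + 1 := by
      refine stepv_lt (hlow 6 0 (by norm_num) (by norm_num) le_rfl (by norm_num)) ?_
      omega
    unfold vchain
    rw [stepv_two (by omega) hne2 h0,
        stepv_fix (hlow 5 2 (by norm_num) (by norm_num) (by norm_num) (by norm_num)),
        stepv_fix (hlow 5 3 (by norm_num) (by norm_num) (by norm_num) (by norm_num)),
        stepv_fix (hlow 4 4 (by norm_num) (by norm_num) (by norm_num) (by norm_num)),
        stepv_fix (hlow 5 5 (by norm_num) (by norm_num) (by norm_num) (by norm_num)),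
        stepv_fix (hlow 6 6 (by norm_num) (by norm_num) (by norm_num) (by norm_num)),
        stepv_fix (hlow 3 7 (by norm_num) (by norm_num) (by norm_num) (by norm_num)),
        stepv_fix (hlow 7 8 (by norm_num) (by norm_num) (by norm_num) (by norm_num)),
        stepv_fix (hlow 6 9 (by norm_num) (by norm_num) (by norm_num) (by norm_num)),
        hfs]

lemma set_eq_self {dp : List Int} {s : Nat} {v : Int} (h : dp[s]? = some v) :
    dp.set s v = dp := by
  have hlt : s < dp.length := (List.getElem?_eq_some_iff.mp h).1
  apply List.ext_getElem?
  intro n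
  rw [List.getElem?_set]
  split
  · next hn => subst hn; exact h.symm
  · rfl

-- one digit of the inner loop, on a list that is dp with dp[s] overwritten by v
lemma step_list {dp : List Int} {s : Nat} (v c d : Int)
    (hc2 : 2 ≤ c)
    (hcost : (PySem.Dict.get? pvCOST d).getD 0 = c)
    (hlen : s < dp.length) (hs1 : 1 ≤ s)
    (hprev : ∀ j : Nat, j < s → dp[j]? = some (fval j)) :
    pvInnerStep (s : Int) (dp.set s v) d = dp.set s (stepv s c d v) := by
  unfold pvInnerStep stepv
  rw [hcost]
  by_cases hge : (s : Int) ≥ c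
  · rw [if_pos hge, if_pos hge]
    have hcast : (s : Int) - c = ((s - c.toNat : Nat) : Int) := by omega
    have hread : (PySem.List.pyGet? (dp.set s v) ((s:Int) - c)).getD (-1) = fval (s - c.toNat) := by
      rw [hcast, PySem.List.pyGet?_natCast, List.getElem?_set_ne (by omega),
          hprev (s - c.toNat) (by omega)]
      rfl
    rw [hread]
    by_cases hp : fval (s - c.toNat) ≥ 0
    · rw [if_pos hp, if_pos hp]
      have hcur : (PySem.List.pyGet? (dp.set s v) (s : Int)).getD (-1) = v := by
        rw [PySem.List.pyGet?_natCast, List.getElem?_set_self hlen]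
        rfl
      rw [hcur]
      by_cases hgt : fval (s - c.toNat) * 10 + d > v
      · rw [if_pos hgt, if_pos hgt, PySem.List.pySetD_natCast, List.set_set]
      · rw [if_neg hgt, if_neg hgt]
    · rw [if_neg hp, if_neg hp]
  · rw [if_neg hge, if_neg hge]

-- the inner loop writes vchain s into dp[s] and changes nothing else
lemma inner_eval {dp : List Int} {s : Nat} (hs1 : 1 ≤ s) (hlen : s < dp.length)
    (hprev : ∀ j : Nat, j < s → dp[j]? = some (fval j))
    (hcur : dp[s]? = some (-1)) :
    pvInner dp (s : Int) = dp.set s (vchain s) := by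
  have h0 : dp = dp.set s (-1) := (set_eq_self hcur).symm
  have hr : PySem.List.pyRange 0 10 1 = [0,1,2,3,4,5,6,7,8,9] := by rfl
  unfold pvInner
  rw [hr]
  simp only [List.foldl]
  conv_lhs => rw [h0]
  rw [step_list (-1) 6 0 (by norm_num) rfl hlen hs1 hprev,
      step_list _ 2 1 (by norm_num) rfl hlen hs1 hprev,
      step_list _ 5 2 (by norm_num) rfl hlen hs1 hprev,
      step_list _ 5 3 (by norm_num) rfl hlen hs1 hprev,
      step_list _ 4 4 (by norm_num) rfl hlen hs1 hprev,
      step_list _ 5 5 (by norm_num) rfl hlen hs1 hprev,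
      step_list _ 6 6 (by norm_num) rfl hlen hs1 hprev,
      step_list _ 3 7 (by norm_num) rfl hlen hs1 hprev,
      step_list _ 7 8 (by norm_num) rfl hlen hs1 hprev,
      step_list _ 6 9 (by norm_num) rfl hlen hs1 hprev]
  rfl

-- the dp list after the outer loop has processed 1..t
def dpAt (M t : Nat) : List Int :=
  (PySem.List.pyRange 1 ((t : Int) + 1) 1).foldl pvInner
    (PySem.List.pySetD (List.replicate (M + 1) (-1 : Int)) 0 0)

lemma dpAt_zero (M : Nat) :
    dpAt M 0 = (List.replicate (M + 1) (-1 : Int)).set 0 0 := by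
  unfold dpAt
  rw [show ((0 : Nat) : Int) + 1 = 1 by norm_num,
      PySem.List.pyRange_one_eq_nil (by norm_num), List.foldl_nil, show (0:Int) = ((0:Nat):Int) from rfl, PySem.List.pySetD_natCast]

lemma dpAt_succ (M t : Nat) :
    dpAt M (t + 1) = pvInner (dpAt M t) ((t : Int) + 1) := by
  unfold dpAt
  rw [show ((t + 1 : Nat) : Int) + 1 = ((t : Int) + 1) + 1 by push_cast; ring,
      PySem.List.pyRange_one_succ_right (by omega), List.foldl_append, List.foldl_cons,
      List.foldl_nil]

lemma dpAt_inv (M : Nat) (hM : 1 ≤ M) :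
    ∀ t : Nat, t ≤ M → (dpAt M t).length = M + 1 ∧
      ∀ i : Nat, i < M + 1 → (dpAt M t)[i]? = some (if i ≤ t then fval i else -1) := by
  intro t
  induction t with
  | zero =>
    intro _
    rw [dpAt_zero]
    refine ⟨by simp, ?_⟩
    intro i hi
    rw [List.getElem?_set]
    rcases Nat.eq_zero_or_pos i with h0 | hpos
    · subst h0
      rw [if_pos rfl, if_pos (by simpa using hi), if_pos le_rfl]
      rfl
    · rw [if_neg (by omega), List.getElem?_replicate, if_pos hi, if_neg (by omega)]
  | succ t ih =>
    intro ht
    obtain ⟨hlen, hget⟩ := ih (by omega)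
    have hprev : ∀ j : Nat, j < t + 1 → (dpAt M t)[j]? = some (fval j) := by
      intro j hj
      rw [hget j (by omega), if_pos (by omega)]
    have hcur : (dpAt M t)[t + 1]? = some (-1) := by
      rw [hget (t + 1) (by omega), if_neg (by omega)]
    have hstep : dpAt M (t + 1) = (dpAt M t).set (t + 1) (vchain (t + 1)) := by
      rw [dpAt_succ, show ((t : Int) + 1) = ((t + 1 : Nat) : Int) by push_cast; ring]
      exact inner_eval (by omega) (by omega) hprev hcur
    rw [hstep]
    refine ⟨by rw [List.length_set]; exact hlen, ?_⟩
    intro i hi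
    rw [List.getElem?_set]
    by_cases hit : i = t + 1
    · subst hit
      rw [if_pos rfl, if_pos (by omega), if_pos le_rfl, vchain_eq (by omega)]
    · rw [if_neg (by omega), hget i hi]
      congr 1
      by_cases hle : i ≤ t
      · rw [if_pos hle, if_pos (by omega)]
      · rw [if_neg hle, if_neg (by omega)]

-- A computes fval for m ≥ 2
lemma portA_eq_fval {m : Int} (hm : 2 ≤ m) : max_number_dp m = fval m.toNat := by
  set M : Nat := m.toNat with hM
  have hm' : m = (M : Int) := by omega
  unfold max_number_dp
  rw [if_neg (by omega)]
  show (PySem.List.pyGet? ((PySem.List.pyRange 1 (m + 1) 1).foldl pvInner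
      (PySem.List.pySetD (List.replicate (m + 1).toNat (-1 : Int)) 0 0)) m).getD (-1) = fval M
  have hfold : (PySem.List.pyRange 1 (m + 1) 1).foldl pvInner
      (PySem.List.pySetD (List.replicate (m + 1).toNat (-1 : Int)) 0 0) = dpAt M M := by
    unfold dpAt
    rw [show (m + 1).toNat = M + 1 by omega, hm']
  rw [hfold]
  obtain ⟨hlen, hget⟩ := dpAt_inv M (by omega) M le_rfl
  rw [hm', PySem.List.pyGet?_natCast, hget M (by omega), if_pos le_rfl]
  rfl

-- B computes fval for m ≥ 2
lemma portB_eq_fval {m : Int} (hm : 2 ≤ m) : max_number_dp_alt m = fval m.toNat := by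
  set M : Nat := m.toNat with hM
  have hm' : m = (M : Int) := by omega
  unfold max_number_dp_alt
  rw [if_neg (by omega)]
  show (if PySem.Int.mod m 2 = 0 then
      PySem.Int.floordiv (10 ^ (PySem.Int.floordiv m 2).toNat - 1) 9
    else
      7 * 10 ^ ((PySem.Int.floordiv m 2).toNat - 1) +
        PySem.Int.floordiv (10 ^ ((PySem.Int.floordiv m 2).toNat - 1) - 1) 9) = fval M
  have hdiv : ∀ k : Nat, PySem.Int.floordiv (10 ^ k - 1) 9 = rep k := by
    intro k
    rw [PySem.Int.floordiv_eq_ediv_of_pos (by norm_num), ← nine_rep k]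
    exact Int.mul_ediv_cancel_left (rep k) (by norm_num)
  have hfd : PySem.Int.floordiv (M : Int) 2 = ((M / 2 : Nat) : Int) := by
    exact_mod_cast PySem.Int.floordiv_natCast M 2
  have hmd : PySem.Int.mod (M : Int) 2 = ((M % 2 : Nat) : Int) := by
    exact_mod_cast PySem.Int.mod_natCast M 2
  rw [hm', hfd, hmd, show ((M / 2 : Nat) : Int).toNat = M / 2 from Int.toNat_natCast _]
  rcases Nat.mod_two_eq_zero_or_one M with he | ho
  · rw [if_pos (by exact_mod_cast he), hdiv, fval_of_even (by omega) he]
  · rw [if_neg (by simp [ho]), hdiv, fval_of_odd (by omega) ho]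

-- ===== VERDICT (by name: the statement is the Claim_ definition above) =====
theorem max_number_dp_spec : Claim_equal_max_number_dp := by
  intro m _
  unfold Spec_max_number_dp
  by_cases hm : m ≤ 1
  · unfold max_number_dp max_number_dp_alt
    rw [if_pos hm, if_pos hm]
  · rw [portA_eq_fval (by omega), portB_eq_fval (by omega)]
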